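-- pv_equiv track=rewrite | github.com/joshuavictorchen/claodex | claodex/cli.py | _strip_trailing_signal
-- ===== SOURCE A (Python) =====
-- def _strip_trailing_signal(text: str, signal: str) -> str:
--     """Remove the last non-empty line if it matches *signal*."""
--     lines = text.splitlines()
--     for i in range(len(lines) - 1, -1, -1):
--         if lines[i].strip():
--             if lines[i].strip() == signal:
--                 lines.pop(i)
--             break
--     return "\n".join(lines).rstrip()
-- ===== SOURCE B (Python) =====
-- def _strip_trailing_signal(text: str, sig: str) -> str:
--     """Remove the last non-empty line if it matches *sig*.
--
--     Single forward pass over the lines: commit lines to `out`, hold the most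
--     recent non-blank line back in `held` (with the blank lines after it in
--     `pending`), and only at the end decide whether the held line is dropped.
--     (Second parameter is A's 'signal'; calls are positional.)
--     """
--     out = []        # lines committed to the output
--     pending = []    # blank lines seen since the held line
--     held = None     # most recent non-blank line, not yet committed
--     for line in text.splitlines():
--         if line.strip():
--             if held is not None:
--                 out.append(held)
--                 out.extend(pending)
--             pending = []
--             held = line
--         else:
--             if held is None:
--                 out.append(line)
--             else:
--                 pending.append(line)
--     if held is not None and held.strip() != sig:
--         out.append(held)
--     return "\n".join(out).rstrip()
-- ===== Notes on version B (the rewrite author's own statement) =====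
-- stated objective: alternative
-- what changed: B replaces A's reverse index scan with break and positional pop by a single forward pass that maintains committed lines, a held last non-blank line and the pending blank run, deciding only at the end whether the held line is dropped.
import Mathlib
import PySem

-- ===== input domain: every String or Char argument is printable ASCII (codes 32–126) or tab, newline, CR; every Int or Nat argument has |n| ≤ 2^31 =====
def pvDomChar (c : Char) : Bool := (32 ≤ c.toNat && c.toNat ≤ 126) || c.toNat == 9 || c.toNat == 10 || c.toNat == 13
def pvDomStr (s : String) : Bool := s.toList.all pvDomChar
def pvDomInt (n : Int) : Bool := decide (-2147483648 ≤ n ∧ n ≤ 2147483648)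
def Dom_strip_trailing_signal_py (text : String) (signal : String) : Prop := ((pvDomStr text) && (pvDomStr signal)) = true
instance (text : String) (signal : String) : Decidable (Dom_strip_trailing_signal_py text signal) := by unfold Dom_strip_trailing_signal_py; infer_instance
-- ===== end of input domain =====

-- B replaces A's reverse index scan with break and positional pop by one forward pass holding back the latest non-blank line; return values proved equal, neither mutates its arguments.

-- ===== PORT A =====
-- the reverse 'for i in range(len(lines)-1, -1, -1)' loop with break: structural recursion on the index;
-- 'lines.pop(i)' at a valid index is exactly List.eraseIdx
def pvAScan (signal : List Char) (lines : List (List Char)) : Nat → List (List Char)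
  | 0 => lines
  | i + 1 =>
    if (PySem.Chars.strip (lines.getD i [])).isEmpty then pvAScan signal lines i
    else if PySem.Chars.strip (lines.getD i []) == signal then lines.eraseIdx i
    else lines

def pvACore (t signal : List Char) : List Char :=
  let lines := PySem.Chars.splitlines t
  let lines := pvAScan signal lines lines.length
  PySem.Chars.rstrip (PySem.Chars.join ['\n'] lines)

def strip_trailing_signal_py (text : String) (signal : String) : String :=
  String.ofList (pvACore text.toList signal.toList)

-- ===== PORT B =====
-- state = (out, pending, held): committed lines, blank lines after the held line, held non-blank line
def pvBStep (st : List (List Char) × List (List Char) × Option (List Char)) (line : List Char) :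
    List (List Char) × List (List Char) × Option (List Char) :=
  if !(PySem.Chars.strip line).isEmpty then
    match st.2.2 with
    | some h => (st.1 ++ [h] ++ st.2.1, ([], some line))
    | none   => (st.1, ([], some line))
  else
    match st.2.2 with
    | none   => (st.1 ++ [line], (st.2.1, none))
    | some h => (st.1, (st.2.1 ++ [line], some h))

def pvBFold (lines : List (List Char)) : List (List Char) × List (List Char) × Option (List Char) :=
  lines.foldl pvBStep ([], ([], none))

def pvBCore (t sig : List Char) : List Char :=
  let st := pvBFold (PySem.Chars.splitlines t)
  let out :=
    match st.2.2 with
    | some h => if !(PySem.Chars.strip h == sig) then st.1 ++ [h] else st.1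
    | none => st.1
  PySem.Chars.rstrip (PySem.Chars.join ['\n'] out)

def strip_trailing_signal_py_alt (text : String) (signal : String) : String :=
  String.ofList (pvBCore text.toList signal.toList)

-- ===== PRECONDITION & SPEC =====
def Spec_strip_trailing_signal_py (text : String) (signal : String) (out : String) : Prop := out = strip_trailing_signal_py_alt text signal
instance (text : String) (signal : String) (out : String) : Decidable (Spec_strip_trailing_signal_py text signal out) := by unfold Spec_strip_trailing_signal_py; infer_instance

-- ===== CLAIM (what is proved, stated in full; the proofs are below) =====
def Claim_equal_strip_trailing_signal_py : Prop := ∀ (text : String) (signal : String), Dom_strip_trailing_signal_py text signal → Spec_strip_trailing_signal_py text signal (strip_trailing_signal_py text signal)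

-- ===== LEMMAS AND PROOFS =====

lemma rstrip_append_all_ws (v w : List Char) (h : w.all PySem.Chars.isspace = true) :
    PySem.Chars.rstrip (v ++ w) = PySem.Chars.rstrip v := by
  simp only [PySem.Chars.rstrip, List.reverse_append, List.dropWhile_append]
  have hw : w.reverse.dropWhile PySem.Chars.isspace = [] := by
    rw [List.dropWhile_eq_nil_iff]; intro x hx; simp at h; exact h x (by simpa using hx)
  simp [hw]

lemma rstrip_eq_nil_of_all_ws (u : List Char) (h : u.all PySem.Chars.isspace = true) :
    PySem.Chars.rstrip u = [] := by
  have hw : u.reverse.dropWhile PySem.Chars.isspace = [] := by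
    rw [List.dropWhile_eq_nil_iff]; intro x hx; simp at h; exact h x (by simpa using hx)
  simp [PySem.Chars.rstrip, hw]

lemma all_ws_of_strip_eq_nil (u : List Char) (h : (PySem.Chars.strip u).isEmpty = true) :
    u.all PySem.Chars.isspace = true := by
  simp only [PySem.Chars.strip, PySem.Chars.lstrip] at h
  rw [List.all_eq_true]
  intro x hx
  rcases (List.takeWhile_append_dropWhile (p := PySem.Chars.isspace) (l := u)) ▸ hx |> List.mem_append.1 with h1 | h1
  · exact List.mem_takeWhile_imp h1
  · have h2 : (u.dropWhile PySem.Chars.isspace).all PySem.Chars.isspace = true := by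
      simp only [PySem.Chars.rstrip, List.isEmpty_iff] at h
      have h3 : (u.dropWhile PySem.Chars.isspace).reverse.dropWhile PySem.Chars.isspace = [] := by
        simpa using congrArg List.reverse h
      rw [List.dropWhile_eq_nil_iff] at h3
      rw [List.all_eq_true]; intro y hy; exact h3 y (by simpa using hy)
    exact (List.all_eq_true.1 h2) x h1

lemma join_concat (Z : List (List Char)) (u : List Char) :
    PySem.Chars.join ['\n'] (Z ++ [u]) =
      (if Z.isEmpty then u else PySem.Chars.join ['\n'] Z ++ '\n' :: u) := by
  induction Z with
  | nil => simp [PySem.Chars.join, List.intercalate]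
  | cons z Z ih =>
    match Z with
    | [] => simp [PySem.Chars.join, List.intercalate]
    | w :: Z' =>
      simp only [PySem.Chars.join, List.intercalate, List.cons_append, List.intersperse,
        List.flatten_cons] at ih ⊢
      rw [ih]
      simp

lemma rstrip_join_concat_wsline (Z : List (List Char)) (u : List Char)
    (h : u.all PySem.Chars.isspace = true) :
    PySem.Chars.rstrip (PySem.Chars.join ['\n'] (Z ++ [u])) =
      PySem.Chars.rstrip (PySem.Chars.join ['\n'] Z) := by
  rw [join_concat]
  split
  · next he => rw [List.isEmpty_iff.1 he, rstrip_eq_nil_of_all_ws u h]; rfl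
  · have : ('\n' :: u).all PySem.Chars.isspace = true := by simp at h ⊢; exact ⟨by decide, h⟩
    exact rstrip_append_all_ws _ _ this

-- dropping an all-blank suffix of the line list does not change the rstripped join
lemma rstrip_join_append_blanks (X P : List (List Char))
    (hP : ∀ l ∈ P, (PySem.Chars.strip l).isEmpty = true) :
    PySem.Chars.rstrip (PySem.Chars.join ['\n'] (X ++ P)) =
      PySem.Chars.rstrip (PySem.Chars.join ['\n'] X) := by
  induction P using List.reverseRecOn with
  | nil => simp
  | append_singleton Q u ih =>
    rw [← List.append_assoc,
      rstrip_join_concat_wsline (X ++ Q) u (all_ws_of_strip_eq_nil u (hP u (by simp)))]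
    exact ih (fun l hl => hP l (by simp [hl]))

lemma pv_getD_right (X P : List (List Char)) (k : Nat) :
    (X ++ P).getD (X.length + k) [] = P.getD k [] := by
  simp [List.getD, List.getElem?_append_right (Nat.le_add_right X.length k)]

-- A's scan skips an all-blank suffix of the line list
lemma scan_skip (sig : List Char) (X P : List (List Char))
    (hP : ∀ l ∈ P, (PySem.Chars.strip l).isEmpty = true) :
    ∀ k, k ≤ P.length → pvAScan sig (X ++ P) (X.length + k) = pvAScan sig (X ++ P) X.length := by
  intro k
  induction k with
  | zero => intro _; rfl
  | succ k ih =>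
    intro hk
    have hkl : k < P.length := by omega
    have hmem : P.getD k [] ∈ P := by
      rw [List.getD_eq_getElem P [] hkl]; exact List.getElem_mem hkl
    rw [show X.length + (k + 1) = (X.length + k) + 1 by omega]
    simp only [pvAScan, pv_getD_right, hP _ hmem, if_true]
    exact ih (by omega)

lemma pv_getD_mid (X : List (List Char)) (h : List Char) (P : List (List Char)) :
    (X ++ h :: P).getD X.length [] = h := by
  simp [List.getD]

lemma pv_eraseIdx_mid (X : List (List Char)) (h : List Char) (P : List (List Char)) :
    (X ++ h :: P).eraseIdx X.length = X ++ P := by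
  rw [List.eraseIdx_append_of_length_le (le_refl X.length)]
  simp

lemma pvBFold_append (L : List (List Char)) (u : List Char) :
    pvBFold (L ++ [u]) = pvBStep (pvBFold L) u := by
  simp [pvBFold, List.foldl_append]

-- the forward-pass invariant: out ++ held ++ pending reassembles the input; pending is blank, held is non-blank
lemma pvB_inv (L : List (List Char)) :
    (∀ l ∈ (pvBFold L).2.1, (PySem.Chars.strip l).isEmpty = true) ∧
    (match (pvBFold L).2.2 with
     | none => (pvBFold L).1 = L ∧ ∀ l ∈ L, (PySem.Chars.strip l).isEmpty = true
     | some h => L = (pvBFold L).1 ++ h :: (pvBFold L).2.1 ∧ (PySem.Chars.strip h).isEmpty = false) := by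
  induction L using List.reverseRecOn with
  | nil => exact ⟨by simp [pvBFold], by simp [pvBFold]⟩
  | append_singleton L u ih =>
    obtain ⟨hpend, hrest⟩ := ih
    rw [pvBFold_append]
    rcases hE : pvBFold L with ⟨X, P, held⟩
    rw [hE] at hpend hrest
    simp only at hpend hrest
    by_cases hu : (PySem.Chars.strip u).isEmpty = true
    · rcases held with _ | h
      · obtain ⟨h1, h2⟩ := hrest
        simp only [pvBStep, hu, Bool.not_true, Bool.false_eq_true, if_false]
        refine ⟨?_, ?_, ?_⟩
        · exact hpend
        · rw [h1]
        · intro l hl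
          rcases List.mem_append.1 hl with hl | hl
          · exact h2 l hl
          · simpa [List.mem_singleton.1 hl] using hu
      · obtain ⟨h1, h2⟩ := hrest
        simp only [pvBStep, hu, Bool.not_true, Bool.false_eq_true, if_false]
        refine ⟨?_, ?_, ?_⟩
        · intro l hl
          rcases List.mem_append.1 hl with hl | hl
          · exact hpend l hl
          · simpa [List.mem_singleton.1 hl] using hu
        · rw [h1]; simp
        · exact h2
    · have hu' : (PySem.Chars.strip u).isEmpty = false := by simp_all
      rcases held with _ | h
      · obtain ⟨h1, _⟩ := hrest
        simp only [pvBStep, hu', Bool.not_false, if_true]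
        refine ⟨?_, ?_, ?_⟩
        · intro l hl; simp at hl
        · rw [h1]
        · trivial
      · obtain ⟨h1, _⟩ := hrest
        simp only [pvBStep, hu', Bool.not_false, if_true]
        refine ⟨?_, ?_, ?_⟩
        · intro l hl; simp at hl
        · rw [h1]; simp
        · trivial

lemma core_eq (t sig : List Char) : pvACore t sig = pvBCore t sig := by
  simp only [pvACore, pvBCore]
  obtain ⟨hpend, hrest⟩ := pvB_inv (PySem.Chars.splitlines t)
  rcases hE : pvBFold (PySem.Chars.splitlines t) with ⟨X, P, held⟩
  rw [hE] at hpend hrest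
  simp only at hpend hrest
  rcases held with _ | h
  · -- no non-blank line at all: A's scan leaves the list unchanged
    obtain ⟨h1, h2⟩ := hrest
    have hsk := scan_skip sig [] (PySem.Chars.splitlines t) h2 (PySem.Chars.splitlines t).length le_rfl
    simp only [List.nil_append, List.length_nil, Nat.zero_add] at hsk
    rw [hsk]
    simp only [pvAScan, h1]
  · obtain ⟨h1, h2⟩ := hrest
    have hL2 : PySem.Chars.splitlines t = (X ++ [h]) ++ P := by rw [h1]; simp
    have hscan : pvAScan sig (PySem.Chars.splitlines t) (PySem.Chars.splitlines t).length =
        pvAScan sig (PySem.Chars.splitlines t) (X.length + 1) := by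
      have hsk := scan_skip sig (X ++ [h]) P hpend P.length le_rfl
      rw [← hL2] at hsk
      have hXl : (X ++ [h]).length = X.length + 1 := by simp
      have hlen : (PySem.Chars.splitlines t).length = (X ++ [h]).length + P.length := by
        rw [hL2]; simp only [List.length_append, List.length_cons, List.length_nil]
      rw [hlen, hsk, hXl]
    rw [hscan]
    have hgd : (PySem.Chars.splitlines t).getD X.length [] = h := by
      rw [h1]; exact pv_getD_mid X h P
    simp only [pvAScan, hgd, h2, Bool.false_eq_true, if_false]
    by_cases hs : (PySem.Chars.strip h == sig) = true
    · rw [if_pos hs]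
      have he : (PySem.Chars.splitlines t).eraseIdx X.length = X ++ P := by
        rw [h1]; exact pv_eraseIdx_mid X h P
      rw [he, rstrip_join_append_blanks X P hpend]
      simp [hs]
    · rw [if_neg hs]
      rw [hL2, rstrip_join_append_blanks (X ++ [h]) P hpend]
      simp [hs]

-- ===== VERDICT (by name: the statement is the Claim_ definition above) =====
theorem strip_trailing_signal_py_spec : Claim_equal_strip_trailing_signal_py := by
  intro text signal _
  show _ = _
  unfold strip_trailing_signal_py strip_trailing_signal_py_alt
  rw [core_eq]
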